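-- pv_equiv track=rewrite | github.com/thoughtworks/mic-predictor | src/utils.py | split_n_grams
-- ===== SOURCE A (Python) =====
-- def split_n_grams(seq, n):
--     """
--     'AGAMQSASM' => [['AGA', 'MQS', 'ASM'], ['GAM','QSA'], ['AMQ', 'SAS']]
--     In case of n = 3
--     """
--     grams = []
--     for i in range(n):
--         grams.append(zip(*[iter(seq[i:])] * n))
--
--     str_ngrams = []
--     for ngrams in grams:
--         x = []
--         for ngram in ngrams:
--             x.append("".join(ngram))
--         str_ngrams.append(x)
--     return str_ngrams
-- ===== SOURCE B (Python) =====
-- def split_n_grams(seq, n):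
--     # single linear scan: distribute each n-gram into the bucket of its start offset mod n
--     if n <= 0:
--         return []
--     buckets = [[] for _ in range(n)]
--     for p in range(len(seq) - n + 1):
--         buckets[p % n].append("".join(seq[p:p + n]))
--     return buckets
-- ===== Notes on version B (the rewrite author's own statement) =====
-- stated objective: alternative
-- what changed: Replaces the n separate zip(*[iter(seq[i:])]*n) per-offset groupings with one linear scan over all start positions that distributes each n-gram into bucket p % n.
import Mathlib
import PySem

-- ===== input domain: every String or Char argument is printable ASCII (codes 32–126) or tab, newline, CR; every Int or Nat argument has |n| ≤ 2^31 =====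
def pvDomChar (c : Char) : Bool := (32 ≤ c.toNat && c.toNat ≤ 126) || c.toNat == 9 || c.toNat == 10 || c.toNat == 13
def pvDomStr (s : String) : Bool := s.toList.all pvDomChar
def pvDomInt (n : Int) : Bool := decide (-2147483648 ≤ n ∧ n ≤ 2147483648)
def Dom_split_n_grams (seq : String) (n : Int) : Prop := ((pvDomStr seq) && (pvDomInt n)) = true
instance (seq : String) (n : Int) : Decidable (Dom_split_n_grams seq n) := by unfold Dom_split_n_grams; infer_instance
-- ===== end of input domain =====

-- B replaces A's n separate zip(*[iter(seq[i:])]*n) groupings by one linear scan over all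
-- start positions that distributes each n-gram into the bucket of its offset mod n
-- (objective: alternative decomposition, same cost).

-- ===== PORT A =====
-- hand-port of the zip(*[iter(l)]*n) idiom: the consecutive COMPLETE chunks of size n
-- (exact for the n ≥ 1 this helper is called with: zip stops at the first incomplete chunk)
def pvChunks (n : Nat) (l : List Char) : List (List Char) :=
  if _h : 0 < n ∧ n ≤ l.length then
    l.take n :: pvChunks n (l.drop n)
  else []
termination_by l.length
decreasing_by simp only [List.length_drop]; omega

def split_n_grams (seq : String) (n : Int) : List (List String) :=
  let grams := (PySem.List.pyRange 0 n 1).map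
    (fun i => pvChunks n.toNat (PySem.List.slice seq.toList (some i) none))
  grams.map (fun ngrams => ngrams.map (fun ngram => String.mk ngram))

-- ===== PORT B =====
def split_n_grams_alt (seq : String) (n : Int) : List (List String) :=
  if n ≤ 0 then []
  else
    let L := seq.toList
    let buckets : List (List String) := List.replicate n.toNat []
    (PySem.List.pyRange 0 ((L.length : Int) - n + 1) 1).foldl
      (fun bs p =>
        let j := PySem.Int.mod p n
        PySem.List.pySetD bs j
          (PySem.List.pyGetD bs j [] ++ [String.mk (PySem.List.slice L (some p) (some (p + n)))]))
      buckets

-- ===== PRECONDITION & SPEC =====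
def Spec_split_n_grams (seq : String) (n : Int) (out : List (List String)) : Prop := out = split_n_grams_alt seq n
instance (seq : String) (n : Int) (out : List (List String)) : Decidable (Spec_split_n_grams seq n out) := by unfold Spec_split_n_grams; infer_instance

-- ===== CLAIM (what is proved, stated in full; the proofs are below) =====
def Claim_equal_split_n_grams : Prop := ∀ (seq : String) (n : Int), Dom_split_n_grams seq n → Spec_split_n_grams seq n (split_n_grams seq n)

-- ===== LEMMAS AND PROOFS =====

-- the bucket fold of B: bucket i collects, in order, g p for the processed p with p % N = i
lemma pvFold_buckets (N : Nat) (g : Nat → String) :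
    ∀ (ps : List Nat) (bs : List (List String)), (∀ p ∈ ps, p % N < bs.length) →
      ps.foldl (fun bs p => bs.set (p % N) (bs.getD (p % N) [] ++ [g p])) bs
      = (List.range bs.length).map (fun i => bs.getD i [] ++ (ps.filter (fun p => p % N == i)).map g) := by
  intro ps
  induction ps with
  | nil =>
      intro bs _
      simp only [List.foldl_nil, List.filter_nil, List.map_nil, List.append_nil]
      apply List.ext_getElem (by simp)
      intro i h1 h2
      simp only [List.getElem_map, List.getElem_range]
      rw [List.getD_eq_getElem _ _ (by simpa using h2)]
  | cons p ps ih =>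
      intro bs hmem
      have hp : p % N < bs.length := hmem p (by simp)
      rw [List.foldl_cons, ih _ (by intro q hq; simpa [List.length_set] using hmem q (by simp [hq]))]
      simp only [List.length_set]
      apply List.map_congr_left
      intro i hi
      simp only [List.mem_range] at hi
      rw [List.getD_eq_getElem _ _ (by simpa [List.length_set] using hi),
          List.getD_eq_getElem _ _ hi, List.getElem_set, List.filter_cons]
      by_cases hij : p % N = i
      · rw [if_pos hij, hij]
        simp [List.getD_eq_getElem _ _ hi, List.getElem?_eq_getElem hi, List.append_assoc]
      · rw [if_neg hij]
        have hb : (p % N == i) = false := by simpa using hij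
        simp [hb]

-- the positions p < m with p % N = i form the arithmetic progression i, i+N, … ;
-- the element after the last one lies in [m, m+N)
lemma pvFilter_range (N i : Nat) (hN : 0 < N) (hi : i < N) :
    ∀ m, ((List.range m).filter (fun p => p % N == i))
          = (List.range ((List.range m).filter (fun p => p % N == i)).length).map (fun k => i + k * N)
        ∧ m ≤ i + ((List.range m).filter (fun p => p % N == i)).length * N
        ∧ i + ((List.range m).filter (fun p => p % N == i)).length * N < m + N := by
  intro m
  induction m with
  | zero => exact ⟨by simp, by omega, by simp [hi]⟩
  | succ m ih =>
      set F := List.filter (fun p => p % N == i) (List.range m) with hFdef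
      obtain ⟨hF, hlo, hhi⟩ := ih
      by_cases hm : m % N = i
      · have hl : List.filter (fun p => p % N == i) [m] = [m] := by simp [hm]
        rw [List.range_succ, List.filter_append, hl, ← hFdef]
        have hv : i + F.length * N = m := by
          have hmod : (i + F.length * N) % N = m % N := by
            rw [Nat.add_mul_mod_self_right, Nat.mod_eq_of_lt hi, hm]
          have hdvd : N ∣ i + F.length * N - m := (Nat.modEq_iff_dvd' hlo).mp hmod.symm
          have h0 := Nat.eq_zero_of_dvd_of_lt hdvd (show i + F.length * N - m < N by omega)
          omega
        have hexp : (F ++ [m]).length * N = F.length * N + N := by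
          rw [List.length_append, List.length_singleton]; ring
        refine ⟨?_, by omega, by omega⟩
        rw [List.length_append, List.length_singleton, List.range_succ, List.map_append, ← hF]
        simp [hv]
      · have hl0 : List.filter (fun p => p % N == i) [m] = [] := by simp [hm]
        rw [List.range_succ, List.filter_append, hl0, List.append_nil, ← hFdef]
        have hne : i + F.length * N ≠ m := fun h =>
          hm (by rw [← h, Nat.add_mul_mod_self_right, Nat.mod_eq_of_lt hi])
        exact ⟨hF, by omega, by omega⟩

-- the chunk list of A at offset i, joined, is the progression of grams starting at i
lemma pvChunks_eq (L : List Char) (N : Nat) (hN : 0 < N) :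
    ∀ (c i : Nat), c * N ≤ L.length - i → L.length - i < c * N + N →
      (pvChunks N (L.drop i)).map String.mk
      = (List.range c).map (fun k => String.mk ((L.drop (i + k * N)).take N)) := by
  intro c
  induction c with
  | zero =>
      intro i _ h2
      rw [pvChunks]
      simp only [Nat.zero_mul, Nat.zero_add] at h2
      rw [dif_neg (by simp only [List.length_drop]; omega)]
      simp
  | succ c ih =>
      intro i h1 h2
      have hNle : N ≤ L.length - i := by
        have : N ≤ (c + 1) * N := by nlinarith
        omega
      rw [pvChunks, dif_pos (by simp only [List.length_drop]; omega)]
      rw [List.map_cons, List.drop_drop]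
      have hrec := ih (i + N) (by
          have : (c + 1) * N = c * N + N := by ring
          omega)
        (by
          have : (c + 1) * N = c * N + N := by ring
          omega)
      rw [hrec, List.range_succ_eq_map, List.map_cons, List.map_map]
      congr 1
      · simp
      · apply List.map_congr_left
        intro k _
        simp only [Function.comp_apply, Nat.succ_eq_add_one]
        congr 3
        ring

-- the Int-indexed fold of port B is the corresponding Nat-indexed bucket fold
lemma pvFoldInt (L : List Char) (n : Int) (N : Nat) (hnN : n = (N : Int)) :
    ∀ (ps : List Nat) (bs : List (List String)),
      (ps.map (fun (k : Nat) => (k : Int))).foldl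
        (fun bs p =>
          PySem.List.pySetD bs (PySem.Int.mod p n)
            (PySem.List.pyGetD bs (PySem.Int.mod p n) [] ++
              [String.mk (PySem.List.slice L (some p) (some (p + n)))])) bs
      = ps.foldl (fun bs p => bs.set (p % N) (bs.getD (p % N) [] ++ [String.mk ((L.drop p).take N)])) bs := by
  intro ps
  induction ps with
  | nil => intro bs; rfl
  | cons p ps ih =>
      intro bs
      rw [List.map_cons, List.foldl_cons, List.foldl_cons, ih]
      congr 1
      rw [hnN, PySem.Int.mod_natCast, PySem.List.pySetD_natCast, PySem.List.pyGetD_natCast,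
          PySem.List.slice_natCast_add]

-- ===== VERDICT (by name: the statement is the Claim_ definition above) =====
theorem split_n_grams_spec : Claim_equal_split_n_grams := by
  intro seq n _
  simp only [Spec_split_n_grams, split_n_grams, split_n_grams_alt]
  by_cases hn : n ≤ 0
  · rw [if_pos hn, PySem.List.pyRange_one_eq_nil hn]
    simp
  · rw [if_neg hn]
    replace hn : 0 < n := by omega
    set L := seq.toList with hL
    set N := n.toNat with hN
    have hNpos : 0 < N := by omega
    have hnN : n = (N : Int) := by omega
    -- A side: map over offsets 0..N-1 of the chunk lists
    have hA : ((PySem.List.pyRange 0 n 1).map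
        (fun i => pvChunks n.toNat (PySem.List.slice L (some i) none))).map
          (fun ngrams => ngrams.map (fun ngram => String.mk ngram))
        = (List.range N).map (fun i => (pvChunks N (L.drop i)).map String.mk) := by
      rw [hnN, PySem.List.pyRange_one]
      simp only [List.map_map, Int.sub_zero, Int.toNat_natCast]
      apply List.map_congr_left
      intro k _
      simp only [Function.comp, zero_add]
      rw [PySem.List.slice_from_natCast]
    rw [hA]
    -- B side: rewrite the int fold as a Nat fold over range M
    have hM : ((L.length : Int) - n + 1).toNat = L.length + 1 - N := by omega
    rw [PySem.List.pyRange_one]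
    simp only [Int.sub_zero, hM, zero_add]
    set M := L.length + 1 - N with hMdef
    rw [pvFoldInt L n N hnN (List.range M) (List.replicate N []),
        pvFold_buckets N (fun p => String.mk ((L.drop p).take N)) (List.range M)
          (List.replicate N [])
          (by intro p _; simp only [List.length_replicate]; exact Nat.mod_lt _ hNpos)]
    simp only [List.length_replicate]
    -- bucketwise equality
    apply List.map_congr_left
    intro i hi
    simp only [List.mem_range] at hi
    have hrep : (List.replicate N ([] : List String)).getD i [] = [] := by
      rw [List.getD_eq_getElem _ _ (by simpa using hi)]
      simp
    rw [hrep, List.nil_append]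
    obtain ⟨hF, hlo, hhi⟩ := pvFilter_range N i hNpos hi M
    set l := ((List.range M).filter (fun p => p % N == i)).length with hl
    rw [hF, List.map_map]
    have hcond : l * N ≤ L.length - i ∧ L.length - i < l * N + N := by
      rcases Nat.eq_zero_or_pos l with h0 | hpos
      · rw [h0] at hlo hhi ⊢
        simp only [Nat.zero_mul] at *
        omega
      · have hle : N ≤ l * N := Nat.le_mul_of_pos_left N hpos
        generalize l * N = P at hlo hhi hle ⊢
        omega
    rw [pvChunks_eq L N hNpos l i hcond.1 hcond.2]
    apply List.map_congr_left
    intro k _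
    simp [Function.comp]
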